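-- pv_equiv track=rewrite | github.com/artivisi/obs-scenes-setup | scripts/setup/usb-hub-validator.py | _detect_id_changes
-- ===== SOURCE A (Python) =====
-- from typing import Dict, List, Optional, Tuple
--
-- def _detect_id_changes(snapshots: List[Dict]) -> bool:
--     """Detect if device IDs changed during monitoring"""
--     if len(snapshots) < 2:
--         return False
--
--     first_cam_ids = set(snapshots[0]['cam_link_ids'])
--     first_audio_ids = set(snapshots[0]['audio_ids'])
--
--     for snapshot in snapshots[1:]:
--         current_cam_ids = set(snapshot['cam_link_ids'])
--         current_audio_ids = set(snapshot['audio_ids'])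
--
--         if current_cam_ids != first_cam_ids or current_audio_ids != first_audio_ids:
--             return True
--
--     return False
-- ===== SOURCE B (Python) =====
-- def _detect_id_changes(snapshots):
--     """Detect if device IDs changed during monitoring"""
--     if len(snapshots) < 2:
--         return False
--     configs = set()
--     for s in snapshots:
--         configs.add((tuple(sorted(set(s['cam_link_ids']))),
--                      tuple(sorted(set(s['audio_ids'])))))
--     return len(configs) > 1
-- ===== Notes on version B (the rewrite author's own statement) =====
-- stated objective: idiomatic
-- what changed: B replaces A's compare-each-snapshot-to-the-first-reference-sets loop with early exit by a single aggregation pass that collects the distinct (camera-ids, audio-ids) set-configurations and returns whether more than one distinct configuration was seen.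
import Mathlib
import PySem

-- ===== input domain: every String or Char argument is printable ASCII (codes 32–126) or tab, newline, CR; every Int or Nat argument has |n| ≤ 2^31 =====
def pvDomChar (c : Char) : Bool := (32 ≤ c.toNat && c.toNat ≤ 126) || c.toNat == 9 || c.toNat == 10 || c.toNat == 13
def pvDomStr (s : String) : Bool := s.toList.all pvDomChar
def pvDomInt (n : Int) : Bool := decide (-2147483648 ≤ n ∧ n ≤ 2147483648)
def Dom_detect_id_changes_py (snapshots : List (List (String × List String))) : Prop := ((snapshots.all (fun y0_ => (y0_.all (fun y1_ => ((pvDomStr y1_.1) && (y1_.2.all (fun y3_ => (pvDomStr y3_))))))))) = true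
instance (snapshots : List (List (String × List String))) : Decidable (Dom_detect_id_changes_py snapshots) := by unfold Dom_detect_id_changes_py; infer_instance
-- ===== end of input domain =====

-- B drops A's early-exit reference comparison in favour of counting distinct configurations; header: one aggregation pass, same return value on Pre_.

-- shared helper: snapshot[key]; the [] default is only reachable outside Pre_ (Python raises KeyError there)
def pvLookupIds (s : List (String × List String)) (k : String) : List String :=
  ((PySem.Dict.mk s).get? k).getD []

-- ===== PORT A =====
def detect_id_changes_py (snapshots : List (List (String × List String))) : Bool :=
  if snapshots.length < 2 then false
  else
    match snapshots with
    | [] => false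
    | first :: rest =>
      let first_cam_ids := PySem.Set.ofList (pvLookupIds first "cam_link_ids")
      let first_audio_ids := PySem.Set.ofList (pvLookupIds first "audio_ids")
      rest.any (fun snapshot =>
        !(PySem.Set.equal (PySem.Set.ofList (pvLookupIds snapshot "cam_link_ids")) first_cam_ids) ||
        !(PySem.Set.equal (PySem.Set.ofList (pvLookupIds snapshot "audio_ids")) first_audio_ids))

-- ===== PORT B =====
-- tuple(sorted(set(xs)))
def pvCanon (xs : List String) : List String :=
  PySem.List.sorted (PySem.Set.ofList xs) (fun x => x) false

def pvConfig (s : List (String × List String)) : List String × List String :=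
  (pvCanon (pvLookupIds s "cam_link_ids"), pvCanon (pvLookupIds s "audio_ids"))

def detect_id_changes_py_alt (snapshots : List (List (String × List String))) : Bool :=
  if snapshots.length < 2 then false
  else
    decide (1 < (snapshots.foldl (fun configs s => PySem.Set.add configs (pvConfig s)) PySem.Set.empty).length)

-- ===== PRECONDITION & SPEC =====
-- Pre_ excludes inputs where some looked-up snapshot lacks the 'cam_link_ids'/'audio_ids' key: Python A
-- raises KeyError there (or, when a later snapshot lacks a key past A's early exit, A returns True while
-- B raises KeyError); with fewer than two snapshots A touches no keys, so no condition is imposed then.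
def Pre_detect_id_changes_py (snapshots : List (List (String × List String))) : Prop :=
  snapshots.length < 2 ∨
    (snapshots.all (fun s => (PySem.Dict.mk s).contains "cam_link_ids" && (PySem.Dict.mk s).contains "audio_ids")) = true
instance (snapshots : List (List (String × List String))) : Decidable (Pre_detect_id_changes_py snapshots) := by unfold Pre_detect_id_changes_py; infer_instance

def pvWitness_detect_id_changes_py : (List (List (String × List String))) :=
  [[("cam_link_ids", ["a"]), ("audio_ids", [])], [("cam_link_ids", ["b"]), ("audio_ids", [])]]

def Spec_detect_id_changes_py (snapshots : List (List (String × List String))) (out : Bool) : Prop := out = detect_id_changes_py_alt snapshots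
instance (snapshots : List (List (String × List String))) (out : Bool) : Decidable (Spec_detect_id_changes_py snapshots out) := by unfold Spec_detect_id_changes_py; infer_instance

-- ===== CLAIM (what is proved, stated in full; the proofs are below) =====
def Claim_equal_detect_id_changes_py : Prop := ∀ (snapshots : List (List (String × List String))), Dom_detect_id_changes_py snapshots → Pre_detect_id_changes_py snapshots → Spec_detect_id_changes_py snapshots (detect_id_changes_py snapshots)

-- ===== LEMMAS AND PROOFS =====

-- set(xs) == set(ys)  ⟺  canonical forms coincide
theorem equal_ofList_iff_canon (xs ys : List String) :
    PySem.Set.equal (PySem.Set.ofList xs) (PySem.Set.ofList ys) = true ↔ pvCanon xs = pvCanon ys := by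
  unfold pvCanon
  rw [PySem.List.sorted_id_eq_sorted_id_iff_perm,
      List.perm_ext_iff_of_nodup (PySem.Set.nodup_ofList xs) (PySem.Set.nodup_ofList ys),
      PySem.Set.equal_iff]

theorem ofList_cons_eq_single {α : Type} [BEq α] [LawfulBEq α] (x : α) (l : List α)
    (h : ∀ y ∈ l, y = x) : PySem.Set.ofList (x :: l) = [x] := by
  rw [PySem.Set.ofList_cons]
  have : PySem.Set.discard (PySem.Set.ofList l) x = [] := by
    rw [List.eq_nil_iff_forall_not_mem]
    intro y hy
    rw [PySem.Set.mem_discard] at hy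
    exact hy.2 (h y ((PySem.Set.mem_ofList _ _).1 hy.1))
  rw [this]

theorem one_lt_ofList_cons_iff {α : Type} [BEq α] [LawfulBEq α] (x : α) (l : List α) :
    1 < (PySem.Set.ofList (x :: l)).length ↔ ∃ y ∈ l, y ≠ x := by
  constructor
  · intro h
    by_contra hc
    push Not at hc
    rw [ofList_cons_eq_single x l hc] at h
    simp at h
  · rintro ⟨y, hy, hne⟩
    have hx : x ∈ PySem.Set.ofList (x :: l) := (PySem.Set.mem_ofList _ _).2 (List.mem_cons_self)
    have hy' : y ∈ PySem.Set.ofList (x :: l) := (PySem.Set.mem_ofList _ _).2 (List.mem_cons_of_mem _ hy)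
    have hnd := PySem.Set.nodup_ofList (x :: l)
    match hs : PySem.Set.ofList (x :: l) with
    | [] => rw [hs] at hx; simp at hx
    | [a] =>
      rw [hs] at hx hy'
      simp at hx hy'
      exact absurd (hy'.trans hx.symm) hne
    | a :: b :: t => simp

theorem foldl_add_eq_ofList_map (snapshots : List (List (String × List String))) :
    snapshots.foldl (fun configs s => PySem.Set.add configs (pvConfig s)) PySem.Set.empty
      = PySem.Set.ofList (snapshots.map pvConfig) := by
  rw [← PySem.Set.update_map_eq_foldl_add]
  rfl

-- ===== VERDICT (by name: the statement is the Claim_ definition above) =====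
theorem detect_id_changes_py_spec : Claim_equal_detect_id_changes_py := by
  intro snapshots _ _
  unfold Spec_detect_id_changes_py detect_id_changes_py detect_id_changes_py_alt
  by_cases hlen : snapshots.length < 2
  · simp [hlen]
  · match snapshots with
    | [] => simp at hlen
    | first :: rest =>
      simp only [if_neg hlen]
      rw [foldl_add_eq_ofList_map, List.map_cons, Bool.eq_iff_iff, decide_eq_true_eq,
          one_lt_ofList_cons_iff, List.any_eq_true]
      constructor
      · rintro ⟨s, hs, ht⟩
        refine ⟨pvConfig s, List.mem_map_of_mem hs, ?_⟩
        simp only [Bool.or_eq_true, Bool.not_eq_true'] at ht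
        intro heq
        unfold pvConfig at heq
        have h1 := congrArg Prod.fst heq
        have h2 := congrArg Prod.snd heq
        simp only at h1 h2
        rcases ht with ht | ht
        · exact absurd ((equal_ofList_iff_canon _ _).2 h1) (by simp [ht])
        · exact absurd ((equal_ofList_iff_canon _ _).2 h2) (by simp [ht])
      · rintro ⟨y, hy, hne⟩
        rw [List.mem_map] at hy
        obtain ⟨s, hs, rfl⟩ := hy
        refine ⟨s, hs, ?_⟩
        simp only [Bool.or_eq_true, Bool.not_eq_true']
        by_contra hc
        push Not at hc
        obtain ⟨h1, h2⟩ := hc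
        apply hne
        unfold pvConfig
        rw [Prod.mk.injEq]
        exact ⟨(equal_ofList_iff_canon _ _).1 (by simpa using h1),
               (equal_ofList_iff_canon _ _).1 (by simpa using h2)⟩
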